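-- pv_equiv track=rewrite | github.com/sharunrajeev/YourFirstContribution | mincost.py | minimumCostOfBreaking
-- ===== SOURCE A (Python) =====
-- def minimumCostOfBreaking(X, Y, m, n):
--
-- 	res = 0
--
-- 	# sort the horizontal cost in reverse order
-- 	X.sort(reverse = True)
-- 	# sort the vertical cost in reverse order
-- 	Y.sort(reverse = True)
-- 	# initialize current width as 1
-- 	hzntl = 1; vert = 1
--
-- 	# loop until one or both
-- 	# cost array are processed
-- 	i = 0; j = 0
-- 	while (i < m and j < n):
--
-- 		if (X[i] > Y[j]):
--
-- 			res += X[i] * vert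
--
-- 			# increase current horizontal
-- 			# part count by 1
-- 			hzntl += 1
-- 			i += 1
--
-- 		else:
-- 			res += Y[j] * hzntl
--
-- 			# increase current vertical
-- 			# part count by 1
-- 			vert += 1
-- 			j += 1
--
-- 	# loop for horizontal array, if remains
-- 	total = 0
-- 	while (i < m):
-- 		total += X[i]
-- 		i += 1
-- 	res += total * vert
--
-- 	#loop for vertical array, if remains
-- 	total = 0
-- 	while (j < n):
-- 		total += Y[j]
-- 		j += 1
-- 	res += total * hzntl
--
-- 	return res
-- ===== SOURCE B (Python) =====
-- def minimumCostOfBreaking(X, Y, m, n):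
--     # Same in-place sorts as A (callers can observe the mutation).
--     X.sort(reverse=True)
--     Y.sort(reverse=True)
--     xs = X[:max(m, 0)]
--     ys = Y[:max(n, 0)]
--     res = sum(x * (1 + sum(1 for y in ys if y >= x)) for x in xs)
--     res += sum(y * (1 + sum(1 for x in xs if x > y)) for y in ys)
--     return res
-- ===== Notes on version B (the rewrite author's own statement) =====
-- stated objective: alternative
-- what changed: Replaces A's two-pointer merge with counters plus two leftover loops by a counting formula: each horizontal cut x is charged x*(1 + number of vertical cuts >= x) and each vertical cut y is charged y*(1 + number of horizontal cuts > y), computed directly over the m/n largest costs.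
import Mathlib
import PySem

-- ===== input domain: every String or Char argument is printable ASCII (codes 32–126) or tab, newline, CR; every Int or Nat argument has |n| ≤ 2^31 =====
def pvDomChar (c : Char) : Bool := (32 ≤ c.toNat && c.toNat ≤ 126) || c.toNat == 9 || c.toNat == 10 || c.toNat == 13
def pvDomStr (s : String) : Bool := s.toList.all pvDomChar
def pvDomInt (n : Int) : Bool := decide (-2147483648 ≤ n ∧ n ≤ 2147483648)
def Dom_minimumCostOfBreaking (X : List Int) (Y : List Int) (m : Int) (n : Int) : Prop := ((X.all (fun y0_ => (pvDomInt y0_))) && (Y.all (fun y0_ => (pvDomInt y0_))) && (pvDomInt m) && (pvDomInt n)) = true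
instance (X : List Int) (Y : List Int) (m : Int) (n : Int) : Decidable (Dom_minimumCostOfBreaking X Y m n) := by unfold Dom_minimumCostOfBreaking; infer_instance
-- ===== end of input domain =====

-- B replaces A's two-pointer merge (with part counters and two leftover loops) by a direct
-- counting formula over the m/n largest costs; equivalence of return values is proved
-- (both A and B sort X and Y in place, so the side effect is identical).

-- ===== PORT A =====
-- the main `while (i < m and j < n)` loop; returns the final (i, j, hzntl, vert, res).
-- Pre_ guarantees every X[i]/Y[j] access is in range; pyGetD's default is never used inside Pre_.
def pvALoop (Xs Ys : List Int) (m n i j hz vt res : Int) : Int × Int × Int × Int × Int :=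
  if i < m ∧ j < n then
    let x := PySem.List.pyGetD Xs i 0
    let y := PySem.List.pyGetD Ys j 0
    if x > y then pvALoop Xs Ys m n (i+1) j (hz+1) vt (res + x*vt)
    else pvALoop Xs Ys m n i (j+1) hz (vt+1) (res + y*hz)
  else (i, j, hz, vt, res)
termination_by ((m - i).toNat + (n - j).toNat)
decreasing_by all_goals omega

-- a `while (i < bnd): total += L[i]` leftover loop
def pvSumLoop (L : List Int) (bnd i acc : Int) : Int :=
  if i < bnd then pvSumLoop L bnd (i+1) (acc + PySem.List.pyGetD L i 0) else acc
termination_by (bnd - i).toNat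
decreasing_by omega

def minimumCostOfBreaking (X : List Int) (Y : List Int) (m : Int) (n : Int) : Int :=
  let Xs := PySem.List.sorted X (fun x => x) true
  let Ys := PySem.List.sorted Y (fun y => y) true
  let s := pvALoop Xs Ys m n 0 0 1 1 0
  let res := s.2.2.2.2
  let res := res + pvSumLoop Xs m s.1 0 * s.2.2.2.1
  let res := res + pvSumLoop Ys n s.2.1 0 * s.2.2.1
  res

-- ===== PORT B =====
def minimumCostOfBreaking_alt (X : List Int) (Y : List Int) (m : Int) (n : Int) : Int :=
  let Xs := PySem.List.sorted X (fun x => x) true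
  let Ys := PySem.List.sorted Y (fun y => y) true
  -- X[:max(m,0)] with a nonnegative stop is exactly `take`
  let xs := Xs.take (max m 0).toNat
  let ys := Ys.take (max n 0).toNat
  let r1 := (xs.map (fun x => x * (1 + ((ys.countP (fun y => decide (x ≤ y)) : Nat) : Int)))).sum
  let r2 := (ys.map (fun y => y * (1 + ((xs.countP (fun x => decide (y < x)) : Nat) : Int)))).sum
  r1 + r2

-- ===== PRECONDITION & SPEC =====
-- A indexes X[0..m) and Y[0..n): it raises IndexError exactly when m > len(X) or n > len(Y).
def Pre_minimumCostOfBreaking (X : List Int) (Y : List Int) (m : Int) (n : Int) : Prop :=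
  m ≤ (X.length : Int) ∧ n ≤ (Y.length : Int)
instance (X : List Int) (Y : List Int) (m : Int) (n : Int) : Decidable (Pre_minimumCostOfBreaking X Y m n) := by unfold Pre_minimumCostOfBreaking; infer_instance
def pvWitness_minimumCostOfBreaking : List Int × List Int × Int × Int := ([3, 1, 2], [4, 5], 3, 2)

def Spec_minimumCostOfBreaking (X : List Int) (Y : List Int) (m : Int) (n : Int) (out : Int) : Prop := out = minimumCostOfBreaking_alt X Y m n
instance (X : List Int) (Y : List Int) (m : Int) (n : Int) (out : Int) : Decidable (Spec_minimumCostOfBreaking X Y m n out) := by unfold Spec_minimumCostOfBreaking; infer_instance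

-- ===== CLAIM (what is proved, stated in full; the proofs are below) =====
def Claim_equal_minimumCostOfBreaking : Prop := ∀ (X : List Int) (Y : List Int) (m : Int) (n : Int), Dom_minimumCostOfBreaking X Y m n → Pre_minimumCostOfBreaking X Y m n → Spec_minimumCostOfBreaking X Y m n (minimumCostOfBreaking X Y m n)

-- ===== LEMMAS AND PROOFS =====

-- the segment L[i..b) (as indexed by A's loops)
def pvSeg (L : List Int) (a b : Int) : List Int := (L.drop a.toNat).take (b - a).toNat

-- B's counting formula, generalised to the tails from positions i and j
def pvPhi (Xs Ys : List Int) (m n i j : Int) : Int :=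
  ((pvSeg Xs i m).map (fun x => x * (1 + j + (((pvSeg Ys j n).countP (fun y => decide (x ≤ y)) : Nat) : Int)))).sum
  + ((pvSeg Ys j n).map (fun y => y * (1 + i + (((pvSeg Xs i m).countP (fun x => decide (y < x)) : Nat) : Int)))).sum

lemma pvSeg_cons (L : List Int) (a b : Int) (ha : 0 ≤ a) (hab : a < b) (hb : b ≤ (L.length : Int)) :
    pvSeg L a b = L.getD a.toNat 0 :: pvSeg L (a+1) b := by
  have hlt : a.toNat < L.length := by omega
  unfold pvSeg
  rw [List.drop_eq_getElem_cons hlt]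
  have h1 : (b - a).toNat = ((b - (a+1)).toNat) + 1 := by omega
  have h2 : a.toNat + 1 = (a+1).toNat := by omega
  rw [h1, List.take_succ_cons, h2, List.getD_eq_getElem _ _ hlt]

lemma pvSeg_nil (L : List Int) (a b : Int) (h : b ≤ a) : pvSeg L a b = [] := by
  unfold pvSeg
  have : (b - a).toNat = 0 := by omega
  simp [this]

lemma pvSeg_le_head (L : List Int) (a b : Int) (ha : 0 ≤ a) (hab : a < b) (hb : b ≤ (L.length : Int))
    (hp : L.Pairwise (fun u v => v ≤ u)) :
    ∀ z ∈ pvSeg L (a+1) b, z ≤ L.getD a.toNat 0 := by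
  intro z hz
  have hlt : a.toNat < L.length := by omega
  have hd : (L.drop a.toNat).Pairwise (fun u v => v ≤ u) := List.Pairwise.drop hp
  rw [List.drop_eq_getElem_cons hlt] at hd
  have := (List.pairwise_cons.mp hd).1
  have hz' : z ∈ L.drop (a.toNat + 1) := by
    have h2 : a.toNat + 1 = (a+1).toNat := by omega
    exact List.mem_of_mem_take (by rw [h2]; exact hz)
  rw [List.getD_eq_getElem _ _ hlt]
  exact this z hz'

lemma pvSumLoop_eq (L : List Int) (b i acc : Int) (hi : 0 ≤ i) (hb : b ≤ (L.length : Int)) :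
    pvSumLoop L b i acc = acc + (pvSeg L i b).sum := by
  rw [pvSumLoop]
  by_cases h : i < b
  · rw [if_pos h, pvSumLoop_eq L b (i+1) _ (by omega) hb, pvSeg_cons L i b hi h hb]
    rw [PySem.List.pyGetD_of_nonneg _ _ hi]; simp; ring
  · rw [if_neg h, pvSeg_nil L i b (by omega)]; simp
termination_by (b - i).toNat
decreasing_by omega

lemma pvMainInv (Xs Ys : List Int) (m n i j res : Int)
    (hX : Xs.Pairwise (fun u v => v ≤ u)) (hY : Ys.Pairwise (fun u v => v ≤ u))
    (hi : 0 ≤ i) (hj : 0 ≤ j) (hm : m ≤ (Xs.length : Int)) (hn : n ≤ (Ys.length : Int)) :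
    (let s := pvALoop Xs Ys m n i j (i+1) (j+1) res
     s.2.2.2.2 + pvSumLoop Xs m s.1 0 * s.2.2.2.1 + pvSumLoop Ys n s.2.1 0 * s.2.2.1)
    = res + pvPhi Xs Ys m n i j := by
  rw [pvALoop]
  by_cases h : i < m ∧ j < n
  · obtain ⟨him, hjn⟩ := h
    rw [if_pos ⟨him, hjn⟩]
    have hx : PySem.List.pyGetD Xs i 0 = Xs.getD i.toNat 0 := PySem.List.pyGetD_of_nonneg _ _ hi
    have hy : PySem.List.pyGetD Ys j 0 = Ys.getD j.toNat 0 := PySem.List.pyGetD_of_nonneg _ _ hj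
    simp only [hx, hy]
    have hXc := pvSeg_cons Xs i m hi him hm
    have hYc := pvSeg_cons Ys j n hj hjn hn
    have hXle := pvSeg_le_head Xs i m hi him hm hX
    have hYle := pvSeg_le_head Ys j n hj hjn hn hY
    generalize hgx : Xs.getD i.toNat 0 = x at hXc hXle ⊢
    generalize hgy : Ys.getD j.toNat 0 = y at hYc hYle ⊢
    have hXb : ∀ z ∈ pvSeg Xs i m, z ≤ x := by
      intro z hz
      rw [hXc] at hz
      rcases List.mem_cons.mp hz with h' | h'
      · exact h'.le
      · exact hXle z h'
    have hYb : ∀ z ∈ pvSeg Ys j n, z ≤ y := by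
      intro z hz
      rw [hYc] at hz
      rcases List.mem_cons.mp hz with h' | h'
      · exact h'.le
      · exact hYle z h'
    by_cases hgt : x > y
    · rw [if_pos hgt]
      have ih := pvMainInv Xs Ys m n (i+1) j (res + x*(j+1)) hX hY (by omega) hj hm hn
      have e1 : i + 1 + 1 = (i+1) + 1 := by ring
      rw [e1, ih]
      have hc0 : (pvSeg Ys j n).countP (fun y' => decide (x ≤ y')) = 0 := by
        rw [List.countP_eq_zero]
        intro z hz
        have := hYb z hz
        simp only [decide_eq_true_eq]
        omega
      have hmap : (pvSeg Ys j n).map (fun y' => y' * (1 + i + (((x :: pvSeg Xs (i+1) m).countP (fun x' => decide (y' < x')) : Nat) : Int)))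
                = (pvSeg Ys j n).map (fun y' => y' * (1 + (i+1) + (((pvSeg Xs (i+1) m).countP (fun x' => decide (y' < x')) : Nat) : Int))) := by
        apply List.map_congr_left
        intro z hz
        have hzy := hYb z hz
        rw [List.countP_cons_of_pos (by simp only [decide_eq_true_eq]; omega)]
        push_cast
        ring
      unfold pvPhi
      rw [hXc, hmap]
      simp only [List.map_cons, List.sum_cons, hc0]
      push_cast
      ring
    · rw [if_neg hgt]
      have ih := pvMainInv Xs Ys m n i (j+1) (res + y*(i+1)) hX hY hi (by omega) hm hn
      have e1 : j + 1 + 1 = (j+1) + 1 := by ring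
      rw [e1, ih]
      have hc0 : (pvSeg Xs i m).countP (fun x' => decide (y < x')) = 0 := by
        rw [List.countP_eq_zero]
        intro z hz
        have := hXb z hz
        simp only [decide_eq_true_eq]
        omega
      have hmap : (pvSeg Xs i m).map (fun x' => x' * (1 + j + (((y :: pvSeg Ys (j+1) n).countP (fun y' => decide (x' ≤ y')) : Nat) : Int)))
                = (pvSeg Xs i m).map (fun x' => x' * (1 + (j+1) + (((pvSeg Ys (j+1) n).countP (fun y' => decide (x' ≤ y')) : Nat) : Int))) := by
        apply List.map_congr_left
        intro z hz
        have hzx := hXb z hz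
        rw [List.countP_cons_of_pos (by simp only [decide_eq_true_eq]; omega)]
        push_cast
        ring
      unfold pvPhi
      rw [hYc, hmap]
      simp only [List.map_cons, List.sum_cons, hc0]
      push_cast
      ring
  · rw [if_neg h]
    simp only
    rw [pvSumLoop_eq Xs m i 0 hi hm, pvSumLoop_eq Ys n j 0 hj hn]
    unfold pvPhi
    have hsum : ∀ (l : List Int) (c : Int), (l.map (fun z => z * c)).sum = l.sum * c :=
      fun l c => by simp [List.sum_map_mul_right]
    rcases (by omega : m ≤ i ∨ n ≤ j) with hc | hc
    · rw [pvSeg_nil Xs i m hc]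
      simp only [List.map_nil, List.sum_nil, List.countP_nil, Nat.cast_zero, add_zero]
      rw [hsum]
      ring
    · rw [pvSeg_nil Ys j n hc]
      simp only [List.map_nil, List.sum_nil, List.countP_nil, Nat.cast_zero, add_zero]
      rw [hsum]
      ring
termination_by ((m - i).toNat + (n - j).toNat)
decreasing_by all_goals omega

-- ===== VERDICT (by name: the statement is the Claim_ definition above) =====
theorem minimumCostOfBreaking_spec : Claim_equal_minimumCostOfBreaking := by
  intro X Y m n _ hpre
  obtain ⟨hm, hn⟩ := hpre
  unfold Spec_minimumCostOfBreaking minimumCostOfBreaking minimumCostOfBreaking_alt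
  have hX := PySem.List.sorted_pairwise_rev (xs := X) (key := fun x => x)
  have hY := PySem.List.sorted_pairwise_rev (xs := Y) (key := fun y => y)
  have h := pvMainInv (PySem.List.sorted X (fun x => x) true) (PySem.List.sorted Y (fun y => y) true)
    m n 0 0 0 hX hY le_rfl le_rfl (by rw [PySem.List.length_sorted]; exact hm)
    (by rw [PySem.List.length_sorted]; exact hn)
  simp only [zero_add] at h
  simp only at h ⊢
  rw [h]
  unfold pvPhi pvSeg
  have e1 : ((max m 0).toNat) = (m - 0).toNat := by omega
  have e2 : ((max n 0).toNat) = (n - 0).toNat := by omega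
  simp [e1, e2]
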